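-- pv_equiv track=rewrite | github.com/myo-05/Codingtest | 프로그래머스/0/181890. 왼쪽 오른쪽/왼쪽 오른쪽.py | solution
-- ===== SOURCE A (Python) =====
-- def solution(str_list):
--     answer = []
--     for i,s in enumerate(str_list):
--         if s == 'l':
--             return str_list[:i]
--         elif s == 'r':
--             return str_list[i+1:]
--     return answer
-- ===== SOURCE B (Python) =====
-- def solution(str_list):
--     n = len(str_list)
--     l_idx = str_list.index('l') if 'l' in str_list else n
--     r_idx = str_list.index('r') if 'r' in str_list else n
--     if l_idx == n and r_idx == n:
--         return []
--     if l_idx < r_idx: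
--         return str_list[:l_idx]
--     return str_list[r_idx + 1:]
-- ===== Notes on version B (the rewrite author's own statement) =====
-- stated objective: alternative
-- what changed: B replaces A's single early-returning enumerate scan by computing the first positions of 'l' and 'r' separately (with len(str_list) as the absent sentinel) and deciding the returned slice by comparing the two indices.
import Mathlib
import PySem

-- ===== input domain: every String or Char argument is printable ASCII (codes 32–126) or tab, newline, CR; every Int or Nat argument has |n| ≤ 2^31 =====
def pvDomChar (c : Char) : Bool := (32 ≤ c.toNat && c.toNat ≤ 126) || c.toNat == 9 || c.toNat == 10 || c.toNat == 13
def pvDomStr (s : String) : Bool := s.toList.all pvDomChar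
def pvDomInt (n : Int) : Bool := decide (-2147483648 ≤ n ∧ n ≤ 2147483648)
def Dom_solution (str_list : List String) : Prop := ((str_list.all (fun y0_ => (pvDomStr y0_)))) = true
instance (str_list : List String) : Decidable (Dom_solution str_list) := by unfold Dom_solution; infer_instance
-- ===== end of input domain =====

-- B finds the first positions of "l" and "r" separately and decides by comparing them,
-- instead of A's single early-returning scan; objective: alternative (same cost).

-- ===== PORT A =====
-- A's for-loop over enumerate(str_list) with early returns, as structural recursion.
def solutionGo (full : List String) : List (Int × String) → List String
  | [] => []
  | (i, s) :: rest =>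
    if s = "l" then PySem.List.slice full none (some i)
    else if s = "r" then PySem.List.slice full (some (i + 1)) none
    else solutionGo full rest

def solution (str_list : List String) : List String :=
  solutionGo str_list (PySem.List.enumerate str_list 0)

-- ===== PORT B =====
def solution_alt (str_list : List String) : List String :=
  let n := str_list.length
  let lIdx := if "l" ∈ str_list then (PySem.List.index? str_list "l").getD n else n
  let rIdx := if "r" ∈ str_list then (PySem.List.index? str_list "r").getD n else n
  if lIdx = n ∧ rIdx = n then []
  else if lIdx < rIdx then PySem.List.slice str_list none (some (lIdx : Int))
  else PySem.List.slice str_list (some ((rIdx : Int) + 1)) none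

-- ===== PRECONDITION & SPEC =====
def Spec_solution (str_list : List String) (out : List String) : Prop := out = solution_alt str_list
instance (str_list : List String) (out : List String) : Decidable (Spec_solution str_list out) := by unfold Spec_solution; infer_instance

-- ===== CLAIM (what is proved, stated in full; the proofs are below) =====
def Claim_equal_solution : Prop := ∀ (str_list : List String), Dom_solution str_list → Spec_solution str_list (solution str_list)

-- ===== LEMMAS AND PROOFS =====

-- If neither "l" nor "r" occurs, A's loop falls through and returns [].
lemma go_miss (full : List String) (xs : List String) (s : Int)
    (hl : "l" ∉ xs) (hr : "r" ∉ xs) :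
    solutionGo full (PySem.List.enumerate xs s) = [] := by
  induction xs generalizing s with
  | nil => simp [PySem.List.enumerate, solutionGo]
  | cons x xs ih =>
    rw [PySem.List.enumerate_cons]
    simp only [List.mem_cons, not_or] at hl hr
    have hx1 : x ≠ "l" := fun h => hl.1 h.symm
    have hx2 : x ≠ "r" := fun h => hr.1 h.symm
    simp [solutionGo, hx1, hx2, ih (s + 1) hl.2 hr.2]

-- A's loop stops at the first index whose element is "l" or "r".
lemma go_hit (full : List String) (xs : List String) (s : Int) (k : Nat)
    (hk : k < xs.length)
    (hbefore : ∀ j (hj : j < k), xs[j]'(by omega) ≠ "l" ∧ xs[j]'(by omega) ≠ "r")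
    (hhit : xs[k] = "l" ∨ xs[k] = "r") :
    solutionGo full (PySem.List.enumerate xs s) =
      if xs[k] = "l" then PySem.List.slice full none (some (s + k))
      else PySem.List.slice full (some (s + k + 1)) none := by
  induction xs generalizing s k with
  | nil => simp at hk
  | cons x xs ih =>
    rw [PySem.List.enumerate_cons]
    cases k with
    | zero =>
      simp only [List.getElem_cons_zero] at hhit ⊢
      rcases hhit with h | h <;> simp [solutionGo, h]
    | succ k =>
      have h0 := hbefore 0 (Nat.succ_pos k)
      simp only [List.getElem_cons_zero] at h0
      simp only [List.getElem_cons_succ] at hhit ⊢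
      have hrec := ih (s + 1) k (by simpa using hk)
        (fun j hj => by simpa using hbefore (j + 1) (by omega)) hhit
      simp only [solutionGo, h0.1, h0.2, if_false, hrec]
      have : s + 1 + (k : Int) = s + (k + 1 : Nat) := by push_cast; ring
      rw [this]
      rfl

-- ===== VERDICT (by name: the statement is the Claim_ definition above) =====
theorem solution_spec : Claim_equal_solution := by
  intro xs _
  unfold Spec_solution solution solution_alt
  by_cases hl : "l" ∈ xs <;> by_cases hr : "r" ∈ xs
  · -- both present
    obtain ⟨li, hli⟩ := (PySem.List.index?_isSome_iff xs "l").2 hl |> Option.isSome_iff_exists.mp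
    obtain ⟨ri, hri⟩ := (PySem.List.index?_isSome_iff xs "r").2 hr |> Option.isSome_iff_exists.mp
    obtain ⟨hlk, hlval, hlmin⟩ := PySem.List.getElem_of_index?_eq_some hli
    obtain ⟨hrk, hrval, hrmin⟩ := PySem.List.getElem_of_index?_eq_some hri
    have hne : li ≠ ri := by
      intro h; subst h
      exact absurd (hlval.symm.trans hrval) (by decide)
    simp only [hl, hr, if_true, hli, hri, Option.getD_some]
    rcases Nat.lt_or_ge li ri with hlt | hge
    · rw [go_hit xs xs 0 li hlk
        (fun j hj => ⟨hlmin j hj, fun h => by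
          have := hrmin j (by omega); exact this (by simp [h])⟩)
        (Or.inl hlval)]
      have : ¬ (li = xs.length ∧ ri = xs.length) := by omega
      simp [hlval, this, hlt, PySem.List.slice_to_natCast]
    · have hrlt : ri < li := by omega
      rw [go_hit xs xs 0 ri hrk
        (fun j hj => ⟨fun h => by
          have := hlmin j (by omega); exact this (by simp [h]),
          hrmin j hj⟩)
        (Or.inr hrval)]
      have hrnotl : xs[ri] ≠ "l" := fun h => by
        rw [h] at hrval; exact absurd hrval (by decide)
      have : ¬ (li = xs.length ∧ ri = xs.length) := by omega
      have hnlt : ¬ li < ri := by omega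
      simp [hrnotl, this, hnlt]
  · -- only "l"
    obtain ⟨li, hli⟩ := (PySem.List.index?_isSome_iff xs "l").2 hl |> Option.isSome_iff_exists.mp
    obtain ⟨hlk, hlval, hlmin⟩ := PySem.List.getElem_of_index?_eq_some hli
    rw [go_hit xs xs 0 li hlk
      (fun j hj => ⟨hlmin j hj, fun h => hr (h ▸ List.getElem_mem _)⟩)
      (Or.inl hlval)]
    have hli' : List.idxOf? "l" xs = some li := by
      rw [← PySem.List.index?_eq_idxOf?]; exact hli
    have h1 : li ≠ xs.length := by omega
    simp [hl, hr, hli', hlval, h1, hlk, PySem.List.slice_to_natCast]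
  · -- only "r"
    obtain ⟨ri, hri⟩ := (PySem.List.index?_isSome_iff xs "r").2 hr |> Option.isSome_iff_exists.mp
    obtain ⟨hrk, hrval, hrmin⟩ := PySem.List.getElem_of_index?_eq_some hri
    rw [go_hit xs xs 0 ri hrk
      (fun j hj => ⟨fun h => hl (h ▸ List.getElem_mem _), hrmin j hj⟩)
      (Or.inr hrval)]
    have hrnotl : xs[ri] ≠ "l" := fun h => by
      rw [h] at hrval; exact absurd hrval (by decide)
    have hri' : List.idxOf? "r" xs = some ri := by
      rw [← PySem.List.index?_eq_idxOf?]; exact hri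
    have h1 : ri ≠ xs.length := by omega
    have h2 : ¬ xs.length < ri := by omega
    simp [hl, hr, hri', hrnotl, h1, h2]
  · rw [go_miss xs xs 0 hl hr]
    simp [hl, hr]
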